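-- pv_equiv track=rewrite | github.com/amirsharapov/android-client-server | main_2.py | segment_events
-- ===== SOURCE A (Python) =====
-- def segment_events(events):
--     all_events = []
--     current_segment = []
--
--     for event in events:
--         if event['type'] == 'mousedown':
--             # Start of a new segment
--             current_segment = [event]
--
--         elif event['type'] == 'mousemove':
--             # Continue the current segment
--             current_segment.append(event)
--
--         elif event['type'] == 'mouseup':
--             # End of the current segment
--             current_segment.append(event)
--
--             # Apply the minimum move events filter for drags here if necessary
--             if len([e for e in current_segment if e['type'] == 'mousemove']) > 10 or len(current_segment) <= 7:
--                 all_events.append(current_segment)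
--
--             # Reset for the next segment
--             current_segment = []
--
--     return all_events
-- ===== SOURCE B (Python) =====
-- def segment_events(events):
--     # Pass 1: keep only the three drag-related event kinds.
--     stream = [e for e in events if e['type'] in ('mousedown', 'mousemove', 'mouseup')]
--
--     # Pass 2: split the stream into chunks, one per mouseup (trailing events
--     # with no closing mouseup never form a segment).
--     chunks = []
--     chunk = []
--     for e in stream:
--         chunk.append(e)
--         if e['type'] == 'mouseup':
--             chunks.append(chunk)
--             chunk = []
--
--     # A chunk's segment starts at its last mousedown (everything before it was
--     # discarded by the drag in progress); if there is none, the whole chunk.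
--     def tail_from_last_mousedown(c):
--         rev = []
--         for e in reversed(c):
--             rev.append(e)
--             if e['type'] == 'mousedown':
--                 return rev[::-1]
--         return c
--
--     # Pass 3: select the segments worth keeping.
--     result = []
--     for c in chunks:
--         seg = tail_from_last_mousedown(c)
--         if sum(1 for e in seg if e['type'] == 'mousemove') > 10 or len(seg) <= 7:
--             result.append(seg)
--     return result
-- ===== Notes on version B (the rewrite author's own statement) =====
-- stated objective: alternative
-- what changed: Replaces A's single stateful accumulator loop (reset on mousedown, emit-and-filter on mouseup) by a pipeline: filter to the three event kinds, split into chunks at each mouseup, trim each chunk to its last mousedown by a backward scan, then select segments.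
import Mathlib
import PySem

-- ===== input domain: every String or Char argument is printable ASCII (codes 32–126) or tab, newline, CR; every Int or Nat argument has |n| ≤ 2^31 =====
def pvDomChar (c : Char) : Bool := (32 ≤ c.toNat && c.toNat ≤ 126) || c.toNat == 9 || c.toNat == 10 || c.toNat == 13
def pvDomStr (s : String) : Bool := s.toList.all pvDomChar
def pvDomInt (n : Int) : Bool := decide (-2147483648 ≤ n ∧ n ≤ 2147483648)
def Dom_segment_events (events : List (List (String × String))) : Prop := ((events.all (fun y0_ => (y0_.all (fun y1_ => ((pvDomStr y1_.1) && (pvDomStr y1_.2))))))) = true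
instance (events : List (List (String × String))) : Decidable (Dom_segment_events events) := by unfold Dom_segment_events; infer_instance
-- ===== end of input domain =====

-- B replaces A's single stateful accumulator loop by a filter/split-at-mouseup/trim-to-last-mousedown/select
-- pipeline (alternative decomposition, same cost); A = B is proved on all inputs where every event has a 'type' key.


-- ===== PORT A =====
-- event['type'] (dict = assoc list, first match); Pre_ guarantees the key is present, '' is never hit there
def pvA_type (e : List (String × String)) : String :=
  (((e.find? (fun p => p.1 == "type")).map Prod.snd).getD "")

def segment_events (events : List (List (String × String))) : List (List (List (String × String))) :=
  (events.foldl
    (fun (st : List (List (List (String × String))) × List (List (String × String))) event =>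
      if pvA_type event == "mousedown" then
        (st.1, [event])
      else if pvA_type event == "mousemove" then
        (st.1, st.2 ++ [event])
      else if pvA_type event == "mouseup" then
        let cur := st.2 ++ [event]
        if (cur.filter (fun e => pvA_type e == "mousemove")).length > 10 || cur.length ≤ 7 then
          (st.1 ++ [cur], [])
        else
          (st.1, [])
      else st)
    ([], [])).1

-- ===== PORT B =====
def pvB_type (e : List (String × String)) : String :=
  (((e.find? (fun p => p.1 == "type")).map Prod.snd).getD "")

def pvB_is3 (e : List (String × String)) : Bool :=
  pvB_type e == "mousedown" || pvB_type e == "mousemove" || pvB_type e == "mouseup"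

-- the for-loop of tail_from_last_mousedown: scans reversed(c) accumulating rev
def pvB_tailGo (l rev : List (List (String × String))) : Option (List (List (String × String))) :=
  match l with
  | [] => none
  | e :: rest =>
    let rev' := rev ++ [e]
    if pvB_type e == "mousedown" then some rev'.reverse else pvB_tailGo rest rev'

def pvB_tail (c : List (List (String × String))) : List (List (String × String)) :=
  (pvB_tailGo c.reverse []).getD c

def pvB_keep (seg : List (List (String × String))) : Bool :=
  (seg.filter (fun e => pvB_type e == "mousemove")).length > 10 || seg.length ≤ 7

def pvB_chunkStep (st : List (List (List (String × String))) × List (List (String × String)))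
    (e : List (String × String)) :
    List (List (List (String × String))) × List (List (String × String)) :=
  let chunk' := st.2 ++ [e]
  if pvB_type e == "mouseup" then (st.1 ++ [chunk'], []) else (st.1, chunk')

def segment_events_alt (events : List (List (String × String))) : List (List (List (String × String))) :=
  let stream := events.filter pvB_is3
  let chunks := (stream.foldl pvB_chunkStep ([], [])).1
  chunks.foldl
    (fun res c =>
      let seg := pvB_tail c
      if pvB_keep seg then res ++ [seg] else res)
    []

-- ===== PRECONDITION & SPEC =====
-- Pre_ excludes exactly the inputs where some event dict has no 'type' key: there Python A raises KeyError.
def Pre_segment_events (events : List (List (String × String))) : Prop :=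
  ∀ e ∈ events, (e.find? (fun p => p.1 == "type")).isSome = true
instance (events : List (List (String × String))) : Decidable (Pre_segment_events events) := by
  unfold Pre_segment_events; infer_instance

def pvWitness_segment_events : (List (List (String × String))) :=
  [[("type", "mousedown")], [("type", "mousemove")], [("type", "mouseup")]]

def Spec_segment_events (events : List (List (String × String))) (out : List (List (List (String × String)))) : Prop := out = segment_events_alt events
instance (events : List (List (String × String))) (out : List (List (List (String × String)))) : Decidable (Spec_segment_events events out) := by unfold Spec_segment_events; infer_instance

-- ===== CLAIM (what is proved, stated in full; the proofs are below) =====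
def Claim_equal_segment_events : Prop := ∀ (events : List (List (String × String))), Dom_segment_events events → Pre_segment_events events → Spec_segment_events events (segment_events events)

-- ===== LEMMAS AND PROOFS =====

def pvFA (st : List (List (List (String × String))) × List (List (String × String)))
    (event : List (String × String)) :
    List (List (List (String × String))) × List (List (String × String)) :=
  if pvA_type event == "mousedown" then
    (st.1, [event])
  else if pvA_type event == "mousemove" then
    (st.1, st.2 ++ [event])
  else if pvA_type event == "mouseup" then
    let cur := st.2 ++ [event]
    if (cur.filter (fun e => pvA_type e == "mousemove")).length > 10 || cur.length ≤ 7 then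
      (st.1 ++ [cur], [])
    else
      (st.1, [])
  else st

def pvG (res : List (List (List (String × String)))) (c : List (List (String × String))) :
    List (List (List (String × String))) :=
  if pvB_keep (pvB_tail c) then res ++ [pvB_tail c] else res

theorem pvA_eq (events : List (List (String × String))) :
    segment_events events = (events.foldl pvFA ([], [])).1 := rfl

theorem pvB_eq (events : List (List (String × String))) :
    segment_events_alt events
      = (((events.filter pvB_is3).foldl pvB_chunkStep ([], [])).1).foldl pvG [] := rfl

theorem pvType_eq : pvA_type = pvB_type := rfl

theorem pvB_tailGo_gen (l : List (List (String × String))) :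
    ∀ rev, pvB_tailGo l rev = (pvB_tailGo l []).map (fun s => s ++ rev.reverse) := by
  induction l with
  | nil => intro rev; simp [pvB_tailGo]
  | cons e rest ih =>
    intro rev
    simp only [pvB_tailGo]
    cases h : (pvB_type e == "mousedown") with
    | true => simp
    | false =>
      simp only [Bool.false_eq_true, if_false]
      rw [ih (rev ++ [e]), ih ([] ++ [e])]
      cases pvB_tailGo rest [] <;> simp

theorem pvB_tail_snoc_down (c : List (List (String × String))) (e : List (String × String))
    (h : (pvB_type e == "mousedown") = true) : pvB_tail (c ++ [e]) = [e] := by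
  simp [pvB_tail, pvB_tailGo, h]

theorem pvB_tail_snoc_not (c : List (List (String × String))) (e : List (String × String))
    (h : (pvB_type e == "mousedown") = false) : pvB_tail (c ++ [e]) = pvB_tail c ++ [e] := by
  unfold pvB_tail
  rw [List.reverse_append]
  simp only [List.reverse_singleton, List.singleton_append, pvB_tailGo, h,
    Bool.false_eq_true, if_false]
  rw [pvB_tailGo_gen c.reverse ([] ++ [e])]
  cases pvB_tailGo c.reverse [] <;> simp

theorem pv_chunk_acc (s : List (List (String × String))) :
    ∀ ch c, s.foldl pvB_chunkStep (ch, c)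
      = (ch ++ (s.foldl pvB_chunkStep ([], c)).1, (s.foldl pvB_chunkStep ([], c)).2) := by
  induction s with
  | nil => intro ch c; simp
  | cons e rest ih =>
    intro ch c
    simp only [List.foldl_cons]
    by_cases h : (pvB_type e == "mouseup") = true
    · have h1 : pvB_chunkStep (ch, c) e = (ch ++ [c ++ [e]], []) := by
        simp [pvB_chunkStep, h]
      have h2 : pvB_chunkStep (([] : List (List (List (String × String)))), c) e
          = ([c ++ [e]], []) := by simp [pvB_chunkStep, h]
      rw [h1, h2, ih (ch ++ [c ++ [e]]) [], ih [c ++ [e]] []]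
      simp
    · have h1 : ∀ K : List (List (List (String × String))),
          pvB_chunkStep (K, c) e = (K, c ++ [e]) := by
        intro K; simp [pvB_chunkStep]; intro hc; exact absurd (by simp [hc]) h
      rw [h1 ch, h1 []]
      exact ih ch (c ++ [e])

theorem pv_proc_acc (ch : List (List (List (String × String)))) :
    ∀ res, ch.foldl pvG res = res ++ ch.foldl pvG [] := by
  induction ch with
  | nil => intro res; simp
  | cons c rest ih =>
    intro res
    simp only [List.foldl_cons]
    rw [ih (pvG res c), ih (pvG [] c)]
    unfold pvG
    split_ifs <;> simp

theorem pv_main_inv (es : List (List (String × String))) :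
    ∀ acc c, (es.foldl pvFA (acc, pvB_tail c)).1
      = acc ++ (((es.filter pvB_is3).foldl pvB_chunkStep ([], c)).1).foldl pvG [] := by
  induction es with
  | nil => intro acc c; simp
  | cons e rest ih =>
    intro acc c
    simp only [List.foldl_cons, List.filter_cons]
    by_cases hd : (pvB_type e == "mousedown") = true
    · have h3 : pvB_is3 e = true := by simp [pvB_is3, hd]
      have hA : pvFA (acc, pvB_tail c) e = (acc, pvB_tail (c ++ [e])) := by
        rw [pvB_tail_snoc_down c e hd]
        simp [pvFA, pvType_eq, hd]
      have hB : pvB_chunkStep (([] : List (List (List (String × String)))), c) e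
          = ([], c ++ [e]) := by
        have : (pvB_type e == "mouseup") = false := by
          simp only [beq_iff_eq] at hd ⊢; simp [hd]
        simp [pvB_chunkStep, this]
      rw [hA, h3]
      simp only [reduceIte]
      rw [List.foldl_cons, hB]
      exact ih acc (c ++ [e])
    · have hd' : (pvB_type e == "mousedown") = false := by simpa using hd
      by_cases hm : (pvB_type e == "mousemove") = true
      · have h3 : pvB_is3 e = true := by simp [pvB_is3, hm]
        have hA : pvFA (acc, pvB_tail c) e = (acc, pvB_tail (c ++ [e])) := by
          rw [pvB_tail_snoc_not c e hd']
          simp [pvFA, pvType_eq, hd', hm]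
        have hB : pvB_chunkStep (([] : List (List (List (String × String)))), c) e
            = ([], c ++ [e]) := by
          have : (pvB_type e == "mouseup") = false := by
            simp only [beq_iff_eq] at hm ⊢; simp [hm]
          simp [pvB_chunkStep, this]
        rw [hA, h3]
        simp only [reduceIte]
        rw [List.foldl_cons, hB]
        exact ih acc (c ++ [e])
      · have hm' : (pvB_type e == "mousemove") = false := by simpa using hm
        by_cases hu : (pvB_type e == "mouseup") = true
        · have h3 : pvB_is3 e = true := by simp [pvB_is3, hu]
          have hA : pvFA (acc, pvB_tail c) e
              = ((if pvB_keep (pvB_tail (c ++ [e])) then acc ++ [pvB_tail (c ++ [e])] else acc),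
                 pvB_tail []) := by
            rw [pvB_tail_snoc_not c e hd']
            simp [pvFA, pvB_keep, pvType_eq, hd', hm', hu, pvB_tail]
            split_ifs <;> simp [pvB_tailGo]
          have hB : pvB_chunkStep (([] : List (List (List (String × String)))), c) e
              = ([c ++ [e]], []) := by simp [pvB_chunkStep, hu]
          rw [hA, h3]
          simp only [reduceIte]
          rw [List.foldl_cons, hB]
          rw [ih (if pvB_keep (pvB_tail (c ++ [e])) then acc ++ [pvB_tail (c ++ [e])] else acc) []]
          rw [pv_chunk_acc (rest.filter pvB_is3) [c ++ [e]] []]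
          simp only [List.singleton_append, List.foldl_cons]
          rw [pv_proc_acc _ (pvG [] (c ++ [e]))]
          unfold pvG
          split_ifs <;> simp
        · have hu' : (pvB_type e == "mouseup") = false := by simpa using hu
          have h3 : pvB_is3 e = false := by simp [pvB_is3, hd', hm', hu']
          have hA : pvFA (acc, pvB_tail c) e = (acc, pvB_tail c) := by
            simp [pvFA, pvType_eq, hd', hm', hu']
          rw [hA, h3]
          simp only [Bool.false_eq_true, reduceIte]
          exact ih acc c

theorem segment_events_main : ∀ events, segment_events events = segment_events_alt events := by
  intro events
  rw [pvA_eq, pvB_eq]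
  have h := pv_main_inv events [] []
  simpa using h

-- ===== VERDICT (by name: the statement is the Claim_ definition above) =====
theorem segment_events_spec : Claim_equal_segment_events := by
  intro events _ _
  exact segment_events_main events
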